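-- pv_equiv track=rewrite | github.com/ridho9/aoc18 | 12/a.py | pots_render
-- ===== SOURCE A (Python) =====
-- def pots_get(pots, idx):
--     if idx in pots:
--         return 1
--     else:
--         return 0
--
-- def pots_render(pots, start, end):
--     res = ''
--     for i in range(start, end):
--         if pots_get(pots, i) == 1:
--             res += "#"
--         else:
--             res += "."
--     return res
-- ===== SOURCE B (Python) =====
-- def pots_render(pots, start, end):
--     buf = ['.'] * (end - start)
--     for p in pots:
--         if start <= p < end:
--             buf[p - start] = '#'
--     return ''.join(buf)
-- ===== Notes on version B (the rewrite author's own statement) =====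
-- stated objective: alternative
-- what changed: B scatters instead of gathers: it pre-fills a '.'-buffer of length end-start and writes '#' at each in-range occupied position while looping over pots, instead of scanning every index of the range and testing list membership.
import Mathlib
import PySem

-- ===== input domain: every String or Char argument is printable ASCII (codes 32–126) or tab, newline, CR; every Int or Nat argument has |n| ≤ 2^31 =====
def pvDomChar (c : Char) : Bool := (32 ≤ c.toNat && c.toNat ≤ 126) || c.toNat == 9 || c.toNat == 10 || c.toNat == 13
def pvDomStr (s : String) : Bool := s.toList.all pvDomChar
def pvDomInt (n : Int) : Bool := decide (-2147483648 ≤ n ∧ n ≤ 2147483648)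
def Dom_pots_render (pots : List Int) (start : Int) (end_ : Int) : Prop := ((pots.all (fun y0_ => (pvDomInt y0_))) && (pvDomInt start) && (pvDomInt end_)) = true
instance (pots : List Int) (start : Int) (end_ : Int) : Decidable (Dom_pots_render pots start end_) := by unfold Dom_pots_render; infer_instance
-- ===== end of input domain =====

-- B scatters instead of gathers: it pre-fills a '.'-buffer and writes '#' at each
-- in-range occupied position in one pass over pots (alternative decomposition).


-- ===== PORT A =====
def pots_get (pots : List Int) (idx : Int) : Int :=
  if pots.contains idx then 1 else 0

def pots_render (pots : List Int) (start : Int) (end_ : Int) : String :=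
  (PySem.List.pyRange start end_ 1).foldl
    (fun res i => res ++ (if pots_get pots i = 1 then "#" else ".")) ""

-- ===== PORT B =====
def pots_render_alt (pots : List Int) (start : Int) (end_ : Int) : String :=
  let buf0 : List Char := List.replicate (end_ - start).toNat '.'
  let buf := pots.foldl
    (fun b p => if start ≤ p ∧ p < end_ then b.set (p - start).toNat '#' else b) buf0
  String.ofList buf

-- ===== PRECONDITION & SPEC =====
def Spec_pots_render (pots : List Int) (start : Int) (end_ : Int) (out : String) : Prop := out = pots_render_alt pots start end_
instance (pots : List Int) (start : Int) (end_ : Int) (out : String) : Decidable (Spec_pots_render pots start end_ out) := by unfold Spec_pots_render; infer_instance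

-- ===== CLAIM (what is proved, stated in full; the proofs are below) =====
def Claim_equal_pots_render : Prop := ∀ (pots : List Int) (start : Int) (end_ : Int), Dom_pots_render pots start end_ → Spec_pots_render pots start end_ (pots_render pots start end_)

-- ===== LEMMAS AND PROOFS =====

-- A's string-building fold, over the character lists
theorem potsA_toList (pots : List Int) :
    ∀ (l : List Int) (s : String),
      (l.foldl (fun res i => res ++ (if pots_get pots i = 1 then "#" else ".")) s).toList
        = s.toList ++ l.map (fun i => if pots.contains i then '#' else '.') := by
  intro l
  induction l with
  | nil => intro s; simp
  | cons i l ih =>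
    intro s
    rw [List.foldl_cons, ih]
    by_cases h : i ∈ pots <;> simp [pots_get, h]

-- B's scatter fold, characterised element-wise
theorem foldB_getElem? (start end_ : Int) :
    ∀ (ps : List Int) (b : List Char), b.length = (end_ - start).toNat →
      ∀ (j : Nat),
      ((ps.foldl (fun b p => if start ≤ p ∧ p < end_ then b.set (p - start).toNat '#' else b) b)[j]?)
        = if (start + (j : Int)) ∈ ps ∧ (j : Int) < end_ - start then some '#' else b[j]? := by
  intro ps
  induction ps with
  | nil => intro b hb j; simp
  | cons p ps ih =>
    intro b hb j
    simp only [List.foldl_cons]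
    by_cases hg : start ≤ p ∧ p < end_
    · rw [if_pos hg, ih (b.set (p - start).toNat '#') (by simp [hb]) j]
      rw [List.getElem?_set]
      by_cases hpj : p = start + (j : Int)
      · have hk : (p - start).toNat = j := by omega
        have hje : (j : Int) < end_ - start := by omega
        have hjb : j < b.length := by omega
        simp [hje, hjb, hpj]
      · have hk : (p - start).toNat ≠ j := by omega
        simp only [hk, if_false, List.mem_cons]
        have : ((start + (j:Int) = p ∨ start + (j:Int) ∈ ps) ∧ (j : Int) < end_ - start)
             ↔ (start + (j:Int) ∈ ps ∧ (j : Int) < end_ - start) := by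
          constructor
          · rintro ⟨h1 | h1, h2⟩
            · exfalso; omega
            · exact ⟨h1, h2⟩
          · exact fun ⟨h1, h2⟩ => ⟨Or.inr h1, h2⟩
        rw [if_congr this rfl rfl]
    · rw [if_neg hg, ih b hb j]
      have : ((start + (j:Int)) ∈ p :: ps ∧ (j : Int) < end_ - start)
           ↔ ((start + (j:Int)) ∈ ps ∧ (j : Int) < end_ - start) := by
        simp only [List.mem_cons]
        constructor
        · rintro ⟨h1 | h1, h2⟩
          · exfalso; omega
          · exact ⟨h1, h2⟩
        · exact fun ⟨h1, h2⟩ => ⟨Or.inr h1, h2⟩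
      rw [if_congr this rfl rfl]

-- ===== VERDICT (by name: the statement is the Claim_ definition above) =====
theorem pots_render_spec : Claim_equal_pots_render := by
  intro pots start end_ _
  show pots_render pots start end_ = pots_render_alt pots start end_
  unfold pots_render pots_render_alt
  rw [← String.toList_inj, potsA_toList]
  simp only [String.toList_ofList, String.toList_empty, List.nil_append]
  apply List.ext_getElem?
  intro j
  rw [foldB_getElem? start end_ pots _ (by simp) j, PySem.List.pyRange_one, List.map_map,
      List.getElem?_replicate]
  by_cases hj : j < (end_ - start).toNat
  · have hje : (j : Int) < end_ - start := by omega
    rw [List.getElem?_map, List.getElem?_range hj]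
    simp only [hj, if_true, Option.map_some, Function.comp, hje, and_true]
    by_cases hm : (start + (j : Int)) ∈ pots
    · simp [hm]
    · simp [hm]
  · have hje : ¬ ((j : Int) < end_ - start) := by omega
    simp [hj, hje]
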